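-- pv_equiv track=rewrite | github.com/ChristianSorianoS/Cuenta-letras | P2 E1.py | cuantas_letras
-- ===== SOURCE A (Python) =====
-- def cuantas_letras(datos):
--     total = 0
--     for linea in datos:
--         linea = linea.split()
--         n = 0
--         for palabra in linea:
--             n = n + len(palabra)
--         total=total+n
--     return total
-- ===== SOURCE B (Python) =====
-- def cuantas_letras(datos):
--     total = 0
--     for linea in datos:
--         for ch in linea:
--             if not ch.isspace():
--                 total += 1
--     return total
-- ===== Notes on version B (the rewrite author's own statement) =====
-- stated objective: simpler
-- what changed: B drops the split()-into-words pass and counts non-whitespace characters directly in one character loop per line, using the identity that the sum of split-word lengths equals the number of non-whitespace characters.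
import Mathlib
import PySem

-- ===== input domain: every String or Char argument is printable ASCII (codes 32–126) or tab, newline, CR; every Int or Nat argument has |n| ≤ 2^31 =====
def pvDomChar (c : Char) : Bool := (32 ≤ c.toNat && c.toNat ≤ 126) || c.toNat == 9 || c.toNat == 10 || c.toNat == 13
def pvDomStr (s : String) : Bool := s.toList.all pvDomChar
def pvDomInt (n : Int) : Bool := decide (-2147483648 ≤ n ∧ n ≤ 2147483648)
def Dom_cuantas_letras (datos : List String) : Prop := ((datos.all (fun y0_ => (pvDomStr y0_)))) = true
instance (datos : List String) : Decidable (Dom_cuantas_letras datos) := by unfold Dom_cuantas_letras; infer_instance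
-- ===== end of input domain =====

-- B replaces the split-into-words pass by a direct count of non-whitespace characters (objective: simpler).

-- ===== PORT A =====
def cuantas_letras (datos : List String) : Int :=
  datos.foldl (fun total linea =>
    let ws := PySem.Str.split₀ linea
    let n := ws.foldl (fun n palabra => n + PySem.Str.len palabra) (0 : Int)
    total + n) 0

-- ===== PORT B =====
def cuantas_letras_alt (datos : List String) : Int :=
  datos.foldl (fun total linea =>
    linea.toList.foldl (fun t ch =>
      if !PySem.Chars.isspace ch then t + 1 else t) total) 0

-- ===== PRECONDITION & SPEC =====
def Spec_cuantas_letras (datos : List String) (out : Int) : Prop := out = cuantas_letras_alt datos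
instance (datos : List String) (out : Int) : Decidable (Spec_cuantas_letras datos out) := by unfold Spec_cuantas_letras; infer_instance

-- ===== CLAIM (what is proved, stated in full; the proofs are below) =====
def Claim_equal_cuantas_letras : Prop := ∀ (datos : List String), Dom_cuantas_letras datos → Spec_cuantas_letras datos (cuantas_letras datos)

-- ===== LEMMAS AND PROOFS =====

-- invariant of split₀.go: total word length collected = non-space chars seen
theorem pv_split0_go_sum (s : List Char) : ∀ (cur : List Char) (acc : List (List Char)),
    ((PySem.Chars.split₀.go s cur acc).map List.length).sum
      = (s.filter (fun c => !PySem.Chars.isspace c)).length + cur.length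
        + ((acc.map List.length).sum) := by
  induction s with
  | nil =>
    intro cur acc
    simp only [PySem.Chars.split₀.go]
    by_cases h : cur.isEmpty
    · simp [List.isEmpty_iff.mp h]
    · simp [h]
      omega
  | cons c rest ih =>
    intro cur acc
    simp only [PySem.Chars.split₀.go]
    by_cases hs : PySem.Chars.isspace c
    · by_cases h : cur.isEmpty
      · simp [hs, ih, List.isEmpty_iff.mp h]
      · simp [hs, h, ih]
        omega
    · simp [hs, ih]
      omega

theorem pv_split0_sum (cs : List Char) :
    ((PySem.Chars.split₀ cs).map List.length).sum
      = (cs.filter (fun c => !PySem.Chars.isspace c)).length := by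
  simpa using pv_split0_go_sum cs [] []

-- A's inner word loop computes the sum of word lengths
theorem pv_innerA (ws : List String) : ∀ (n : Int),
    ws.foldl (fun n palabra => n + PySem.Str.len palabra) n
      = n + (((ws.map String.toList).map List.length).sum : Nat) := by
  induction ws with
  | nil => intro n; simp
  | cons w t ih =>
    intro n
    rw [List.foldl_cons, ih]
    simp [PySem.Str.len]
    ring

-- B's inner char loop counts the non-space characters
theorem pv_innerB (cs : List Char) : ∀ (t : Int),
    cs.foldl (fun t ch => if !PySem.Chars.isspace ch then t + 1 else t) t
      = t + ((cs.filter (fun c => !PySem.Chars.isspace c)).length : Nat) := by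
  induction cs with
  | nil => intro t; simp
  | cons c rest ih =>
    intro t
    rw [List.foldl_cons]
    by_cases hs : PySem.Chars.isspace c
    · rw [if_neg (by simp [hs]), ih]
      simp [hs]
    · rw [if_pos (by simp [hs]), ih]
      simp [hs]
      ring

theorem pv_line_eq (total : Int) (linea : String) :
    (total + (PySem.Str.split₀ linea).foldl (fun n p => n + PySem.Str.len p) (0 : Int))
      = linea.toList.foldl (fun t ch => if !PySem.Chars.isspace ch then t + 1 else t) total := by
  rw [pv_innerA, pv_innerB]
  have : ((PySem.Str.split₀ linea).map String.toList).map List.length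
      = (PySem.Chars.split₀ linea.toList).map List.length := by
    simp [PySem.Str.split₀, Function.comp, List.map_map]
  rw [this, pv_split0_sum]
  ring

-- ===== VERDICT (by name: the statement is the Claim_ definition above) =====
theorem cuantas_letras_spec : Claim_equal_cuantas_letras := by
  intro datos _
  unfold Spec_cuantas_letras cuantas_letras cuantas_letras_alt
  congr 1
  funext total linea
  exact pv_line_eq total linea
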